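-- pv_equiv track=rewrite | github.com/Soriader/LeetCodeMediumTask | Tasks/LongestBalancedSubstringIITask.py | best_two_letters
-- ===== SOURCE A (Python) =====
-- def best_two_letters(x: str, y: str, barrier: str, s: str) -> int:
--     diff = 0
--     best = 0
--     first = {0: -1}
--
--     for i, ch in enumerate(s):
--         if ch == barrier:
--             diff = 0
--             first = {0: i}
--             continue
--
--         if ch == x:
--             diff += 1
--         elif ch == y:
--             diff -= 1
--
--         if diff in first:
--             best = max(best, i - first[diff])
--         else:
--             first[diff] = i
--
--     return best
-- ===== SOURCE B (Python) =====
-- def _segments(barrier, s):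
--     # split s into maximal barrier-free segments, char by char
--     segs = []
--     cur = []
--     for ch in s:
--         if ch == barrier:
--             segs.append(cur)
--             cur = []
--         else:
--             cur.append(ch)
--     segs.append(cur)
--     return segs
--
--
-- def _scan(x, y, seg, best):
--     # local prefix-balance scan: setdefault records the first local index of each
--     # balance, and the max is taken unconditionally (a fresh balance contributes 0)
--     diff = 0
--     first = {0: -1}
--     for j, ch in enumerate(seg):
--         if ch == x:
--             diff += 1
--         elif ch == y:
--             diff -= 1
--         first.setdefault(diff, j)
--         best = max(best, j - first[diff])
--     return best
--
--
-- def best_two_letters(x: str, y: str, barrier: str, s: str) -> int: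
--     best = 0
--     for seg in _segments(barrier, s):
--         best = _scan(x, y, seg, best)
--     return best
-- ===== Notes on version B (the rewrite author's own statement) =====
-- stated objective: alternative
-- what changed: B first splits s char-by-char into maximal barrier-free segments and then runs an independent local prefix-balance scan (local dict {0:-1}) over each segment, instead of A's single flat loop that resets its state inline at each barrier character.
import Mathlib
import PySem

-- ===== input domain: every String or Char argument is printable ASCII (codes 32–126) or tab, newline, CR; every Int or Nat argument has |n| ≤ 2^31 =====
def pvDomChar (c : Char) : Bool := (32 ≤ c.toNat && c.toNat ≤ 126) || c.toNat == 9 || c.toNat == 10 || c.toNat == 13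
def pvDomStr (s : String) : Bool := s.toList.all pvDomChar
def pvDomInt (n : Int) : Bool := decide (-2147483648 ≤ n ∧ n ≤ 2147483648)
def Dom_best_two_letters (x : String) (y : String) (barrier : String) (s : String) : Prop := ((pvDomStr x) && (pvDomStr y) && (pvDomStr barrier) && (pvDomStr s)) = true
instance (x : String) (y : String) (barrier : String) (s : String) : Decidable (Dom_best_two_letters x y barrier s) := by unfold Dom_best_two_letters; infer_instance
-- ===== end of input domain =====

-- B splits s into maximal barrier-free segments and scans each with a local prefix-balance dict,
-- instead of A's single flat loop with inline reset; alternative decomposition, same cost.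


-- Python `ch == t` where ch is one character and t an arbitrary string
def pvIsC (t : String) (c : Char) : Bool := t.toList == [c]

-- ===== PORT A =====
-- A's single for-loop: state (global index i, diff, best, first), inline reset at barrier
def pvLoopA (x y barrier : String) : List Char → Int → Int → Int → PySem.Dict Int Int → Int
  | [], _, _, best, _ => best
  | c :: rest, i, diff, best, first =>
    if pvIsC barrier c then
      pvLoopA x y barrier rest (i + 1) 0 best (PySem.Dict.ofList [(0, i)])
    else
      let diff' := if pvIsC x c then diff + 1 else if pvIsC y c then diff - 1 else diff
      match first.get? diff' with
      | some v => pvLoopA x y barrier rest (i + 1) diff' (max best (i - v)) first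
      | none => pvLoopA x y barrier rest (i + 1) diff' best (first.insert diff' i)

def best_two_letters (x : String) (y : String) (barrier : String) (s : String) : Int :=
  pvLoopA x y barrier s.toList 0 0 0 (PySem.Dict.ofList [(0, -1)])

-- ===== PORT B =====
-- split into maximal barrier-free segments (char-by-char, final segment always appended)
def pvSegs (barrier : String) : List Char → List Char → List (List Char)
  | [], cur => [cur]
  | c :: rest, cur =>
    if pvIsC barrier c then cur :: pvSegs barrier rest []
    else pvSegs barrier rest (cur ++ [c])

-- local prefix-balance scan of one segment (local index j; setdefault records the
-- first local index of a balance; the max is taken unconditionally).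
-- `first[diff]` after setdefault is always present: get? is some, the getD 0 default is never used.
def pvLoopB (x y : String) : List Char → Int → Int → Int → PySem.Dict Int Int → Int
  | [], _, _, best, _ => best
  | c :: rest, j, diff, best, first =>
    let diff' := if pvIsC x c then diff + 1 else if pvIsC y c then diff - 1 else diff
    let first' := first.setdefault diff' j
    pvLoopB x y rest (j + 1) diff' (max best (j - (first'.get? diff').getD 0)) first'

def best_two_letters_alt (x : String) (y : String) (barrier : String) (s : String) : Int :=
  (pvSegs barrier s.toList []).foldl
    (fun best seg => pvLoopB x y seg 0 0 best (PySem.Dict.ofList [(0, -1)])) 0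

-- ===== PRECONDITION & SPEC =====
def Spec_best_two_letters (x : String) (y : String) (barrier : String) (s : String) (out : Int) : Prop := out = best_two_letters_alt x y barrier s
instance (x : String) (y : String) (barrier : String) (s : String) (out : Int) : Decidable (Spec_best_two_letters x y barrier s out) := by unfold Spec_best_two_letters; infer_instance

-- ===== CLAIM (what is proved, stated in full; the proofs are below) =====
def Claim_equal_best_two_letters : Prop := ∀ (x : String) (y : String) (barrier : String) (s : String), Dom_best_two_letters x y barrier s → Spec_best_two_letters x y barrier s (best_two_letters x y barrier s)

-- ===== LEMMAS AND PROOFS =====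

-- shift all (local) values of a dict by an offset (proof-only helper)
def pvShift (off : Int) (d : PySem.Dict Int Int) : PySem.Dict Int Int :=
  PySem.Dict.mk (d.items.map (fun p => (p.1, p.2 + off)))

theorem pvShift_get? (off : Int) (d : PySem.Dict Int Int) (k : Int) :
    (pvShift off d).get? k = (d.get? k).map (· + off) := by
  simp only [pvShift, PySem.Dict.get?, List.find?_map, Option.map_map]
  rfl

theorem pvShift_contains (off : Int) (d : PySem.Dict Int Int) (k : Int) :
    (pvShift off d).contains k = d.contains k := by
  simp [pvShift, PySem.Dict.contains, List.any_map, Function.comp_def]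

theorem pvShift_insert (off : Int) (d : PySem.Dict Int Int) (k v : Int) :
    pvShift off (d.insert k v) = (pvShift off d).insert k (v + off) := by
  simp only [PySem.Dict.insert, pvShift_contains]
  by_cases h : d.contains k
  · simp only [h, if_pos, pvShift, List.map_map]
    congr 1
    refine List.map_congr_left (fun q _ => ?_)
    by_cases hq : q.1 = k <;> simp [hq]
  · simp only [h, Bool.false_eq_true, if_false, pvShift, List.map_append, List.map_cons,
      List.map_nil]

-- one step of B's scan on the full state (j, diff, best, first)
def pvStepB (x y : String) (st : Int × Int × Int × PySem.Dict Int Int) (c : Char) :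
    Int × Int × Int × PySem.Dict Int Int :=
  let diff' := if pvIsC x c then st.2.1 + 1 else if pvIsC y c then st.2.1 - 1 else st.2.1
  let first' := st.2.2.2.setdefault diff' st.1
  (st.1 + 1, diff', max st.2.2.1 (st.1 - (first'.get? diff').getD 0), first')

def pvRunB (x y : String) : List Char → (Int × Int × Int × PySem.Dict Int Int) → Int × Int × Int × PySem.Dict Int Int
  | [], st => st
  | c :: rest, st => pvRunB x y rest (pvStepB x y st c)

-- B's continuation: remaining chars, current mid-segment state
def pvContB (x y barrier : String) : List Char → (Int × Int × Int × PySem.Dict Int Int) → Int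
  | [], st => st.2.2.1
  | c :: rest, st =>
    if pvIsC barrier c then
      (pvSegs barrier rest []).foldl
        (fun best seg => pvLoopB x y seg 0 0 best (PySem.Dict.ofList [(0, -1)])) st.2.2.1
    else pvContB x y barrier rest (pvStepB x y st c)

theorem pvLoopB_eq_runB (x y : String) (cs : List Char) (j diff best : Int)
    (d : PySem.Dict Int Int) :
    pvLoopB x y cs j diff best d = (pvRunB x y cs (j, diff, best, d)).2.2.1 := by
  induction cs generalizing j diff best d with
  | nil => rfl
  | cons c rest ih => simp only [pvLoopB, pvRunB, pvStepB]; exact ih _ _ _ _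

theorem pvRunB_append (x y : String) (a b : List Char) (st : Int × Int × Int × PySem.Dict Int Int) :
    pvRunB x y (a ++ b) st = pvRunB x y b (pvRunB x y a st) := by
  induction a generalizing st with
  | nil => rfl
  | cons c rest ih => simp [pvRunB, ih]

theorem pvSegs_foldl_eq_contB (x y barrier : String) (cs cur : List Char) (best0 : Int) :
    (pvSegs barrier cs cur).foldl
      (fun best seg => pvLoopB x y seg 0 0 best (PySem.Dict.ofList [(0, -1)])) best0
    = pvContB x y barrier cs (pvRunB x y cur (0, 0, best0, PySem.Dict.ofList [(0, -1)])) := by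
  induction cs generalizing cur best0 with
  | nil =>
    simp [pvSegs, pvContB, List.foldl, pvLoopB_eq_runB]
  | cons c rest ih =>
    by_cases h : pvIsC barrier c
    · have hb : ∀ st : Int × Int × Int × PySem.Dict Int Int,
          pvContB x y barrier (c :: rest) st
          = (pvSegs barrier rest []).foldl
              (fun best seg => pvLoopB x y seg 0 0 best (PySem.Dict.ofList [(0, -1)])) st.2.2.1 := by
        intro st; simp [pvContB, h]
      have hrb : (pvRunB x y cur (0, 0, best0, PySem.Dict.ofList [(0, -1)])).2.2.1
          = pvLoopB x y cur 0 0 best0 (PySem.Dict.ofList [(0, -1)]) :=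
        (pvLoopB_eq_runB x y cur 0 0 best0 _).symm
      simp [pvSegs, h, hb, hrb]
  -- state after cur++[c] is one pvStepB after the state after cur
    · have : pvRunB x y (cur ++ [c]) (0, 0, best0, PySem.Dict.ofList [(0, -1)])
          = pvStepB x y (pvRunB x y cur (0, 0, best0, PySem.Dict.ofList [(0, -1)])) c := by
        rw [pvRunB_append]; rfl
      simp [pvSegs, h, pvContB, ih, this]

-- KEY: A's flat loop at global index j+off, with the dict's values shifted by off,
-- computes B's continuation from the local state (j, diff, best, d).
theorem pvLoopA_eq_contB (x y barrier : String) (cs : List Char) (j off diff best : Int)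
    (hbest : 0 ≤ best) (d : PySem.Dict Int Int) :
    pvLoopA x y barrier cs (j + off) diff best (pvShift off d)
    = pvContB x y barrier cs (j, diff, best, d) := by
  induction cs generalizing j off diff best d with
  | nil => rfl
  | cons c rest ih =>
    by_cases h : pvIsC barrier c
    · -- A resets to {0 : i} = pvShift (i+1) {0 : -1}; B folds the remaining segments afresh
      have e : (-1 : Int) + (j + off + 1) = j + off := by ring
      have h1 : PySem.Dict.ofList [((0 : Int), j + off)]
          = pvShift (j + off + 1) (PySem.Dict.ofList [(0, -1)]) := by
        show PySem.Dict.mk [(0, j + off)] = PySem.Dict.mk [(0, -1 + (j + off + 1))]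
        rw [e]
      have h2 := ih 0 (j + off + 1) 0 best hbest (PySem.Dict.ofList [(0, -1)])
      rw [zero_add] at h2
      simp only [pvLoopA, pvContB, h, if_pos]
      rw [h1, h2, pvSegs_foldl_eq_contB x y barrier rest [] best]
      rfl
    · simp only [pvLoopA, pvContB, h, Bool.false_eq_true, if_false, pvStepB]
      rw [pvShift_get?]
      cases hg : d.get? (if pvIsC x c then diff + 1 else if pvIsC y c then diff - 1 else diff) with
      | some v =>
        -- key already present: setdefault is the identity and the lookup returns v
        simp only [Option.map_some]
        have hcont : d.contains (if pvIsC x c then diff + 1 else if pvIsC y c then diff - 1 else diff) = true := by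
          rw [PySem.Dict.contains_eq_isSome_get?, hg]; rfl
        have harith : (j : Int) + off - (v + off) = j - v := by ring
        rw [harith, show (j : Int) + off + 1 = (j + 1) + off by ring,
          ih _ _ _ _ (le_trans hbest (le_max_left _ _)) d]
        simp [PySem.Dict.setdefault_of_contains _ _ hcont, hg]
      | none =>
        -- fresh key: A inserts; B's setdefault inserts and the max contributes j - j = 0
        simp only [Option.map_none]
        have hcont : d.contains (if pvIsC x c then diff + 1 else if pvIsC y c then diff - 1 else diff) = false := by
          rw [PySem.Dict.contains_eq_isSome_get?, hg]; rfl
        rw [show (j : Int) + off + 1 = (j + 1) + off by ring, ← pvShift_insert,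
          ih _ _ _ _ hbest _]
        simp [PySem.Dict.setdefault_of_not_contains _ _ hcont, PySem.Dict.get?_insert_self,
          max_eq_left hbest]

-- ===== VERDICT (by name: the statement is the Claim_ definition above) =====
theorem best_two_letters_spec : Claim_equal_best_two_letters := by
  intro x y barrier s _
  show best_two_letters x y barrier s = best_two_letters_alt x y barrier s
  unfold best_two_letters best_two_letters_alt
  have h1 : PySem.Dict.ofList [((0 : Int), (-1 : Int))]
      = pvShift 0 (PySem.Dict.ofList [(0, -1)]) := by
    show PySem.Dict.mk [(0, -1)] = PySem.Dict.mk [(0, -1 + 0)]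
    norm_num
  have h2 := pvLoopA_eq_contB x y barrier s.toList 0 0 0 0 le_rfl (PySem.Dict.ofList [(0, -1)])
  rw [zero_add] at h2
  conv_lhs => rw [h1]
  rw [h2, pvSegs_foldl_eq_contB x y barrier s.toList [] 0]
  rfl
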